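-- pv_equiv track=rewrite | github.com/kester2000/number_comb | board.py | get_line_score
-- ===== SOURCE A (Python) =====
-- def get_line_score(score_list: list) -> int:
--     # 得到一行分数，score_list为该行
--
--     # num为得到第一个非癞子
--     num = -1
--     for i in score_list:
--         if i != -1:
--             num = i
--             break
--
--     if num == -1:
--         raise Exception("所有均为癞子")
--
--     # 转化所有癞子
--     change_list = [num if x == -1 else x for x in score_list]
--
--     # 全部相同则得分
--     if all(x == num for x in change_list):
--         return num
--
--     return 0
-- ===== SOURCE B (Python) =====
-- def get_line_score(score_list: list) -> int:
--     # Collect the distinct non-wildcard values in one pass.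
--     vals = {x for x in score_list if x != -1}
--     if not vals:
--         raise Exception("所有均为癞子")
--     if len(vals) == 1:
--         return next(iter(vals))
--     return 0
-- ===== Notes on version B (the rewrite author's own statement) =====
-- stated objective: simpler
-- what changed: Replaces A's find-first-non-wildcard scan plus wildcard-substitution list plus all() rescan with a single-pass set of distinct non-wildcard values and a cardinality check.
import Mathlib
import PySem

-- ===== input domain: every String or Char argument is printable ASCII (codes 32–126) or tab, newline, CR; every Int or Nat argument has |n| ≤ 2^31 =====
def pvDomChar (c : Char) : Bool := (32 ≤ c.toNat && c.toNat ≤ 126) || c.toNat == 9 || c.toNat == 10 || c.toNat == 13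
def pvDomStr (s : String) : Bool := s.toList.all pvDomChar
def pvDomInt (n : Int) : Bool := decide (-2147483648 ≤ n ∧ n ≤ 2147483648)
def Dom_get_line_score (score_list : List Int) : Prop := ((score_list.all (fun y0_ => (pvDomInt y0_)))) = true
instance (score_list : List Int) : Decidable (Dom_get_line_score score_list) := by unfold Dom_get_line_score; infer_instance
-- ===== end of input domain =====

-- B replaces A's find-first/substitute/rescan flow with one distinct-value set and a cardinality check (simpler).
-- Both programs raise on all-wildcard input; Pre_ excludes exactly those inputs.

-- ===== PORT A =====
-- 'for i in score_list: if i != -1: num = i; break' (initial num = -1)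
def pvFindNum : List Int → Int
  | [] => -1
  | i :: rest => if i ≠ -1 then i else pvFindNum rest

def get_line_score (score_list : List Int) : Int :=
  let num := pvFindNum score_list
  if num = -1 then 0  -- Python: raise Exception("所有均为癞子"); excluded by Pre_
  else
    let change_list := score_list.map (fun x => if x = -1 then num else x)
    if change_list.all (fun x => x == num) then num else 0

-- ===== PORT B =====
def get_line_score_alt (score_list : List Int) : Int :=
  let vals : PySem.Set Int := PySem.Set.ofList (score_list.filter (fun x => x != -1))
  if vals = [] then 0  -- Python: raise Exception("所有均为癞子"); excluded by Pre_
  else if PySem.Set.len vals = 1 then vals.headI  -- next(iter(vals)): order-independent, the set is a singleton here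
  else 0

-- ===== PRECONDITION & SPEC =====
-- A (and B) raise the exception exactly when every entry is the wildcard -1; those inputs are excluded.
def Pre_get_line_score (score_list : List Int) : Prop := ∃ x ∈ score_list, x ≠ -1
instance (score_list : List Int) : Decidable (Pre_get_line_score score_list) := by unfold Pre_get_line_score; infer_instance

def pvWitness_get_line_score : List Int := [3, -1, 3]

def Spec_get_line_score (score_list : List Int) (out : Int) : Prop := out = get_line_score_alt score_list
instance (score_list : List Int) (out : Int) : Decidable (Spec_get_line_score score_list out) := by unfold Spec_get_line_score; infer_instance

-- ===== CLAIM (what is proved, stated in full; the proofs are below) =====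
def Claim_equal_get_line_score : Prop := ∀ (score_list : List Int), Dom_get_line_score score_list → Pre_get_line_score score_list → Spec_get_line_score score_list (get_line_score score_list)

-- ===== LEMMAS AND PROOFS =====

-- A's first-non-wildcard scan is the head of the non-wildcard filter (default -1).
theorem pvFindNum_eq_headD (l : List Int) :
    pvFindNum l = (l.filter (fun x => x != -1)).headD (-1) := by
  induction l with
  | nil => rfl
  | cons i t ih =>
    by_cases h : i = -1
    · simp [pvFindNum, h, ih]
    · simp [pvFindNum, h]

theorem pv_ofList_singleton (a : Int) (t : List Int) (h : ∀ x ∈ t, x = a) :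
    PySem.Set.ofList (a :: t) = [a] := by
  rw [PySem.Set.ofList_cons]
  have : PySem.Set.discard (PySem.Set.ofList t) a = [] := by
    apply List.eq_nil_iff_forall_not_mem.2
    intro y hy
    rw [PySem.Set.mem_discard] at hy
    exact hy.2 (h y ((PySem.Set.mem_ofList t y).1 hy.1))
  rw [this]

theorem get_line_score_spec : Claim_equal_get_line_score := by
  intro l _ hpre
  unfold Spec_get_line_score
  unfold Pre_get_line_score at hpre
  set f := l.filter (fun x => x != -1) with hf
  have hfne : f ≠ [] := by
    obtain ⟨x, hx, hxne⟩ := hpre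
    intro h
    have : x ∈ f := by simp [hf, List.mem_filter, hx, hxne]
    simp [h] at this
  obtain ⟨a, t, hft⟩ := List.exists_cons_of_ne_nil hfne
  have haf : a ∈ f := by rw [hft]; exact List.mem_cons_self
  have hane : a ≠ -1 := by
    have := (List.mem_filter.1 haf).2
    simpa using this
  have hnum : pvFindNum l = a := by
    rw [pvFindNum_eq_headD, ← hf, hft]; rfl
  by_cases hall : ∀ x ∈ t, x = a
  · -- all non-wildcard values equal a: both return a
    have hvals : PySem.Set.ofList f = [a] := by
      rw [hft]; exact pv_ofList_singleton a t hall
    have hBf : get_line_score_alt l = a := by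
      unfold get_line_score_alt
      rw [← hf, hvals]
      simp [PySem.Set.len, List.headI]
    have hA : get_line_score l = a := by
      unfold get_line_score
      rw [hnum]
      have hc : (l.map (fun x => if x = -1 then a else x)).all (fun x => x == a) = true := by
        rw [List.all_eq_true]
        intro y hy
        obtain ⟨x, hx, rfl⟩ := List.mem_map.1 hy
        by_cases hx1 : x = -1
        · simp [hx1]
        · have hxf : x ∈ f := by simp [hf, List.mem_filter, hx, hx1]
          rw [hft] at hxf
          rcases List.mem_cons.1 hxf with h | h
          · simp [h]
          · simp [hall x h]
      simp [hane, hc]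
    rw [hA, hBf]
  · -- two distinct non-wildcard values: both return 0
    push Not at hall
    obtain ⟨x, hxt, hxa⟩ := hall
    have hxf : x ∈ f := by rw [hft]; exact List.mem_cons_of_mem a hxt
    have hxl : x ∈ l := (List.mem_filter.1 hxf).1
    have hxne : x ≠ -1 := by
      have := (List.mem_filter.1 hxf).2
      simpa using this
    have hB : get_line_score_alt l = 0 := by
      unfold get_line_score_alt
      rw [← hf]
      have hmem_a : a ∈ PySem.Set.ofList f := (PySem.Set.mem_ofList f a).2 haf
      have hmem_x : x ∈ PySem.Set.ofList f := (PySem.Set.mem_ofList f x).2 hxf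
      have hne : PySem.Set.ofList f ≠ [] := by
        intro h; rw [h] at hmem_a; simp at hmem_a
      obtain ⟨y, z, r, hs⟩ : ∃ y z r, PySem.Set.ofList f = y :: z :: r := by
        cases hs : PySem.Set.ofList f with
        | nil => exact absurd hs hne
        | cons y s =>
          cases s with
          | nil =>
            rw [hs] at hmem_a hmem_x
            simp at hmem_a hmem_x
            exact absurd (hmem_x.trans hmem_a.symm) hxa
          | cons z r => exact ⟨y, z, r, rfl⟩
      simp [hs, PySem.Set.len]
      intro h
      omega
    have hA : get_line_score l = 0 := by
      unfold get_line_score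
      rw [hnum]
      have hc : (l.map (fun x => if x = -1 then a else x)).all (fun y => y == a) = false := by
        rw [List.all_eq_false]
        refine ⟨_, List.mem_map.2 ⟨x, hxl, rfl⟩, ?_⟩
        simp [hxne, hxa]
      simp [hane, hc]
    rw [hA, hB]
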